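-- pv_equiv track=rewrite | github.com/jesnyder/colony_count | python_program/c0106_truncate_two_lists.py | truncate_two_lists
-- ===== SOURCE A (Python) =====
-- def truncate_two_lists(list_a, list_b, min_a, max_a, min_b, max_b):
--     """
--
--     """
--     list_a_truncated, list_b_truncated = [], []
--
--     for i in range(len(list_a)):
--         if list_a[i] >= min_a:
--             if list_a[i] < max_a:
--                 list_a_truncated.append(list_a[i])
--                 list_b_truncated.append(list_b[i])
--
--     list_a, list_b = [], []
--     for i in range(len(list_b_truncated)):
--         if list_b_truncated[i] >= min_b:
--             if list_b_truncated[i] < max_b: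
--                 list_a.append(list_a_truncated[i])
--                 list_b.append(list_b_truncated[i])
--
--
--     return(list_a, list_b)
-- ===== SOURCE B (Python) =====
-- def truncate_two_lists(list_a, list_b, min_a, max_a, min_b, max_b):
--     list_a_out, list_b_out = [], []
--     for i in range(len(list_a)):
--         a = list_a[i]
--         if min_a <= a < max_a:
--             b = list_b[i]
--             if min_b <= b < max_b:
--                 list_a_out.append(a)
--                 list_b_out.append(b)
--     return (list_a_out, list_b_out)
-- ===== Notes on version B (the rewrite author's own statement) =====
-- stated objective: simpler
-- what changed: One single pass testing both range bounds together replaces A's two passes with intermediate truncated lists.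
import Mathlib
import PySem

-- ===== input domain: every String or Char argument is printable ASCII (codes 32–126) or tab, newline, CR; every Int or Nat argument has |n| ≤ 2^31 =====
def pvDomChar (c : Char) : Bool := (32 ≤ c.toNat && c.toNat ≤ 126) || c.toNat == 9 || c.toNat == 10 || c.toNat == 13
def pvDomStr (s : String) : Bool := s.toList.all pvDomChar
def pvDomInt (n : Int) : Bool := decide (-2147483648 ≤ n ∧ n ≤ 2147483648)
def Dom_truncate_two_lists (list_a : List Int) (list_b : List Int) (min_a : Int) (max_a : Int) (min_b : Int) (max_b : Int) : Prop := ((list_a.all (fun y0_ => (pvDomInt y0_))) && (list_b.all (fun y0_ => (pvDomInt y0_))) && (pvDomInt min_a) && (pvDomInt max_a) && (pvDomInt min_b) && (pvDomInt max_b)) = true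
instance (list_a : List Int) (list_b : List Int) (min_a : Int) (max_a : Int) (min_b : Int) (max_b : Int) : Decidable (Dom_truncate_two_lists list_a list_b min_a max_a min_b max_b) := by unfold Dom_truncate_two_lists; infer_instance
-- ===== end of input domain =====

-- B replaces A's two filtering passes (with intermediate truncated lists) by one single pass that
-- tests both range bounds together: simpler, same O(n) cost, identical return values and the same
-- IndexError when list_b is shorter than list_a.


-- ===== PORT A =====
def truncate_two_lists (list_a : List Int) (list_b : List Int) (min_a : Int) (max_a : Int) (min_b : Int) (max_b : Int) : List Int × List Int :=
  -- first pass: keep pairs whose a-value lies in [min_a, max_a)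
  let p1 := (PySem.List.pyRange 0 (PySem.List.len list_a)).foldl
    (fun (st : List Int × List Int) i =>
      if min_a ≤ PySem.List.pyGetD list_a i 0 then
        if PySem.List.pyGetD list_a i 0 < max_a then
          (st.1 ++ [PySem.List.pyGetD list_a i 0], st.2 ++ [PySem.List.pyGetD list_b i 0])
        else st
      else st) ([], [])
  -- second pass: keep pairs whose b-value lies in [min_b, max_b)
  (PySem.List.pyRange 0 (PySem.List.len p1.2)).foldl
    (fun (st : List Int × List Int) i =>
      if min_b ≤ PySem.List.pyGetD p1.2 i 0 then
        if PySem.List.pyGetD p1.2 i 0 < max_b then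
          (st.1 ++ [PySem.List.pyGetD p1.1 i 0], st.2 ++ [PySem.List.pyGetD p1.2 i 0])
        else st
      else st) ([], [])

-- ===== PORT B =====
def pvAltGo (list_b : List Int) (min_a : Int) (max_a : Int) (min_b : Int) (max_b : Int) : List Int → Nat → List Int × List Int
  | [], _ => ([], [])
  | a :: rest, i =>
    if min_a ≤ a ∧ a < max_a then
      let b := PySem.List.pyGetD list_b (i : Int) 0
      if min_b ≤ b ∧ b < max_b then
        let r := pvAltGo list_b min_a max_a min_b max_b rest (i + 1)
        (a :: r.1, b :: r.2)
      else pvAltGo list_b min_a max_a min_b max_b rest (i + 1)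
    else pvAltGo list_b min_a max_a min_b max_b rest (i + 1)

def truncate_two_lists_alt (list_a : List Int) (list_b : List Int) (min_a : Int) (max_a : Int) (min_b : Int) (max_b : Int) : List Int × List Int :=
  pvAltGo list_b min_a max_a min_b max_b list_a 0

-- ===== PRECONDITION & SPEC =====
-- Pre_ excludes exactly the inputs on which the Python A raises IndexError (an a-passing index
-- beyond the end of list_b); B raises the same IndexError there.
def Pre_truncate_two_lists (list_a : List Int) (list_b : List Int) (min_a : Int) (max_a : Int) (min_b : Int) (max_b : Int) : Prop :=
  ∀ k, k < list_a.length → min_a ≤ list_a.getD k 0 → list_a.getD k 0 < max_a → k < list_b.length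
instance (list_a : List Int) (list_b : List Int) (min_a : Int) (max_a : Int) (min_b : Int) (max_b : Int) : Decidable (Pre_truncate_two_lists list_a list_b min_a max_a min_b max_b) := by unfold Pre_truncate_two_lists; infer_instance
def pvWitness_truncate_two_lists : List Int × List Int × Int × Int × Int × Int := ([1, 5, 10], [2, 3, 4], 1, 6, 0, 10)
def Spec_truncate_two_lists (list_a : List Int) (list_b : List Int) (min_a : Int) (max_a : Int) (min_b : Int) (max_b : Int) (out : List Int × List Int) : Prop := out = truncate_two_lists_alt list_a list_b min_a max_a min_b max_b
instance (list_a : List Int) (list_b : List Int) (min_a : Int) (max_a : Int) (min_b : Int) (max_b : Int) (out : List Int × List Int) : Decidable (Spec_truncate_two_lists list_a list_b min_a max_a min_b max_b out) := by unfold Spec_truncate_two_lists; infer_instance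

-- ===== CLAIM (what is proved, stated in full; the proofs are below) =====
def Claim_equal_truncate_two_lists : Prop := ∀ (list_a : List Int) (list_b : List Int) (min_a : Int) (max_a : Int) (min_b : Int) (max_b : Int), Dom_truncate_two_lists list_a list_b min_a max_a min_b max_b → Pre_truncate_two_lists list_a list_b min_a max_a min_b max_b → Spec_truncate_two_lists list_a list_b min_a max_a min_b max_b (truncate_two_lists list_a list_b min_a max_a min_b max_b)

-- ===== LEMMAS AND PROOFS =====

-- the index-padded pair list: element k is (u[k] or 0, v[k] or 0), for k < |u|
def pvPad (u v : List Int) : List (Int × Int) :=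
  (List.range u.length).map (fun k => (u.getD k 0, v.getD k 0))

theorem pvPad_cons (x : Int) (xs v : List Int) :
    pvPad (x :: xs) v = (x, v.getD 0 0) :: pvPad xs (v.drop 1) := by
  simp [pvPad, List.range_succ_eq_map, List.map_map, Function.comp, List.getD,
    List.getElem?_drop]

theorem pvPad_length (u v : List Int) : (pvPad u v).length = u.length := by
  simp [pvPad]

-- generic shape of one of A's passes
theorem pv_pass_core (u v : List Int) (P : Int × Int → Bool) (f g : Int × Int → Int) :
    (PySem.List.pyRange 0 (PySem.List.len u)).foldl
      (fun (st : List Int × List Int) i =>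
        if P (PySem.List.pyGetD u i 0, PySem.List.pyGetD v i 0) then
          (st.1 ++ [f (PySem.List.pyGetD u i 0, PySem.List.pyGetD v i 0)],
           st.2 ++ [g (PySem.List.pyGetD u i 0, PySem.List.pyGetD v i 0)])
        else st) ([], [])
    = (((pvPad u v).filter P).map f, ((pvPad u v).filter P).map g) := by
  have hcv : ∀ (st : List Int × List Int), ∀ i ∈ PySem.List.pyRange 0 (PySem.List.len u),
      (if P (PySem.List.pyGetD u i 0, PySem.List.pyGetD v i 0) then
        (st.1 ++ [f (PySem.List.pyGetD u i 0, PySem.List.pyGetD v i 0)],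
         st.2 ++ [g (PySem.List.pyGetD u i 0, PySem.List.pyGetD v i 0)])
      else st)
      = (fun (st : List Int × List Int) (z : Int × Int) =>
          ((fun l z => if P z then l ++ [f z] else l) st.1 z,
           (fun l z => if P z then l ++ [g z] else l) st.2 z)) st
          (PySem.List.pyGetD (pvPad u v) i (0, 0)) := by
    intro st i hi
    rw [PySem.List.mem_pyRange_one] at hi
    have h0 : (0:Int) ≤ i := hi.1
    have hlt : i.toNat < u.length := by
      have := hi.2
      simp [PySem.List.len] at this
      omega
    have hz : PySem.List.pyGetD (pvPad u v) i ((0:Int), (0:Int))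
        = (PySem.List.pyGetD u i 0, PySem.List.pyGetD v i 0) := by
      rw [PySem.List.pyGetD_of_nonneg _ _ h0, PySem.List.pyGetD_of_nonneg _ _ h0,
        PySem.List.pyGetD_of_nonneg _ _ h0]
      simp only [pvPad]
      rw [PySem.List.getD_map_range _ _ _ _ hlt]
    rw [hz]
    by_cases hP : P (PySem.List.pyGetD u i 0, PySem.List.pyGetD v i 0) <;> simp [hP]
  rw [PySem.List.foldl_congr_mem _ _ _ _ hcv]
  have hlen : PySem.List.len u = PySem.List.len (pvPad u v) := by
    simp [PySem.List.len, pvPad_length]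
  rw [hlen, PySem.List.foldl_pyRange_zero_pyGetD (pvPad u v) ((0 : Int), (0 : Int))
      (fun (st : List Int × List Int) (z : Int × Int) =>
        ((fun l z => if P z then l ++ [f z] else l) st.1 z,
         (fun l z => if P z then l ++ [g z] else l) st.2 z)) ([], [])]
  beta_reduce
  rw [PySem.List.foldl_prod_mk (fun l (z : Int × Int) => if P z then l ++ [f z] else l)
      (fun l (z : Int × Int) => if P z then l ++ [g z] else l) (pvPad u v) [] [],
    PySem.List.foldl_append_if, PySem.List.foldl_append_if]
  simp

-- pvPad of the two projections of a pair list gives the pair list back (swapped)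
theorem pvPad_proj (w : List (Int × Int)) :
    pvPad (w.map Prod.snd) (w.map Prod.fst) = w.map (fun z => (z.2, z.1)) := by
  induction w with
  | nil => rfl
  | cons z zs ih => rw [List.map_cons, List.map_cons, pvPad_cons]; simp [ih]

-- the combined predicate
def pvKeep (min_a max_a min_b max_b : Int) (z : Int × Int) : Bool :=
  (decide (min_a ≤ z.1) && decide (z.1 < max_a)) && (decide (min_b ≤ z.2) && decide (z.2 < max_b))

-- A's value in closed form
theorem pvA_eq (list_a list_b : List Int) (min_a max_a min_b max_b : Int) :
    truncate_two_lists list_a list_b min_a max_a min_b max_b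
    = (((pvPad list_a list_b).filter (pvKeep min_a max_a min_b max_b)).map Prod.fst,
       ((pvPad list_a list_b).filter (pvKeep min_a max_a min_b max_b)).map Prod.snd) := by
  unfold truncate_two_lists
  have h1 := pv_pass_core list_a list_b
      (fun z => decide (min_a ≤ z.1) && decide (z.1 < max_a)) Prod.fst Prod.snd
  have hc1 : ∀ (st : List Int × List Int), ∀ i ∈ PySem.List.pyRange 0 (PySem.List.len list_a),
      (if min_a ≤ PySem.List.pyGetD list_a i 0 then
        if PySem.List.pyGetD list_a i 0 < max_a then
          (st.1 ++ [PySem.List.pyGetD list_a i 0], st.2 ++ [PySem.List.pyGetD list_b i 0])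
        else st
      else st)
      = (fun (st : List Int × List Int) i =>
          if (fun (z : Int × Int) => decide (min_a ≤ z.1) && decide (z.1 < max_a))
              (PySem.List.pyGetD list_a i 0, PySem.List.pyGetD list_b i 0) then
            (st.1 ++ [(PySem.List.pyGetD list_a i 0, PySem.List.pyGetD list_b i 0).1],
             st.2 ++ [(PySem.List.pyGetD list_a i 0, PySem.List.pyGetD list_b i 0).2])
          else st) st i := by
    intro st i _
    by_cases hA : min_a ≤ PySem.List.pyGetD list_a i 0 <;>
      by_cases hB : PySem.List.pyGetD list_a i 0 < max_a <;> simp [hA, hB]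
  rw [PySem.List.foldl_congr_mem _ _ _ _ hc1, h1]
  set w1 := (pvPad list_a list_b).filter
      (fun z => decide (min_a ≤ z.1) && decide (z.1 < max_a)) with hw1
  have h2 := pv_pass_core (w1.map Prod.snd) (w1.map Prod.fst)
      (fun z => decide (min_b ≤ z.1) && decide (z.1 < max_b)) Prod.snd Prod.fst
  have hc2 : ∀ (st : List Int × List Int),
      ∀ i ∈ PySem.List.pyRange 0 (PySem.List.len (w1.map Prod.snd)),
      (if min_b ≤ PySem.List.pyGetD (w1.map Prod.snd) i 0 then
        if PySem.List.pyGetD (w1.map Prod.snd) i 0 < max_b then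
          (st.1 ++ [PySem.List.pyGetD (w1.map Prod.fst) i 0],
           st.2 ++ [PySem.List.pyGetD (w1.map Prod.snd) i 0])
        else st
      else st)
      = (fun (st : List Int × List Int) i =>
          if (fun (z : Int × Int) => decide (min_b ≤ z.1) && decide (z.1 < max_b))
              (PySem.List.pyGetD (w1.map Prod.snd) i 0, PySem.List.pyGetD (w1.map Prod.fst) i 0) then
            (st.1 ++ [(PySem.List.pyGetD (w1.map Prod.snd) i 0, PySem.List.pyGetD (w1.map Prod.fst) i 0).2],
             st.2 ++ [(PySem.List.pyGetD (w1.map Prod.snd) i 0, PySem.List.pyGetD (w1.map Prod.fst) i 0).1])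
          else st) st i := by
    intro st i _
    by_cases hA : min_b ≤ PySem.List.pyGetD (w1.map Prod.snd) i 0 <;>
      by_cases hB : PySem.List.pyGetD (w1.map Prod.snd) i 0 < max_b <;> simp [hA, hB]
  rw [PySem.List.foldl_congr_mem _ _ _ _ hc2, h2, pvPad_proj, List.filter_map]
  simp only [List.map_map, hw1, List.filter_filter]
  refine congrArg₂ Prod.mk ?_ ?_ <;>
  · refine congrArg _ (List.filter_congr ?_)
    intro z _
    exact Bool.and_comm _ _

-- B's value in closed form, for every starting index
theorem pvB_eq (list_b : List Int) (min_a max_a min_b max_b : Int) :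
    ∀ (l : List Int) (k : Nat),
    pvAltGo list_b min_a max_a min_b max_b l k
    = (((pvPad l (list_b.drop k)).filter (pvKeep min_a max_a min_b max_b)).map Prod.fst,
       ((pvPad l (list_b.drop k)).filter (pvKeep min_a max_a min_b max_b)).map Prod.snd) := by
  intro l
  induction l with
  | nil => intro k; rfl
  | cons a rest ih =>
    intro k
    have hb : PySem.List.pyGetD list_b (k : Int) 0 = list_b[k]?.getD 0 := by
      rw [PySem.List.pyGetD_natCast]
      simp [List.getD]
    rw [pvAltGo]
    simp only [hb]
    rw [pvPad_cons, List.drop_drop]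
    simp only [List.getD, List.getElem?_drop, Nat.add_zero]
    by_cases hA : min_a ≤ a ∧ a < max_a
    · by_cases hB : min_b ≤ list_b[k]?.getD 0 ∧ list_b[k]?.getD 0 < max_b
      · have hk : pvKeep min_a max_a min_b max_b (a, list_b[k]?.getD 0) = true := by
          simp [pvKeep, hA.1, hA.2, hB.1, hB.2]
        simp [hA, hB, List.filter_cons, hk, ih (k + 1)]
      · have hk : pvKeep min_a max_a min_b max_b (a, list_b[k]?.getD 0) = false := by
          simp [pvKeep]
          omega
        simp [hA, hB, List.filter_cons, hk, ih (k + 1)]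
    · have hk : pvKeep min_a max_a min_b max_b (a, list_b[k]?.getD 0) = false := by
        simp [pvKeep]
        omega
      simp [hA, List.filter_cons, hk, ih (k + 1)]

-- ===== VERDICT (by name: the statement is the Claim_ definition above) =====
theorem truncate_two_lists_spec : Claim_equal_truncate_two_lists := by
  intro list_a list_b min_a max_a min_b max_b _ _
  unfold Spec_truncate_two_lists truncate_two_lists_alt
  rw [pvA_eq, pvB_eq]
  simp
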